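-- pv_equiv track=rewrite | github.com/ffwatcharin/OOP | lap3/lap3_3.py | is_plusone_dictionary
-- ===== SOURCE A (Python) =====
-- def is_plusone_dictionary(dict):
--     list = []
--     for key, value in dict.items():
--         list.append(key)
--         list.append(value)
--
--     for i in range(1,len(list)):
--         if list[i] - list[i-1] != 1:
--             return False
--     return True
-- ===== SOURCE B (Python) =====
-- def is_plusone_dictionary(dict):
--     prev = None
--     for key, value in dict.items():
--         if prev is not None and key - prev != 1:
--             return False
--         if value - key != 1:
--             return False
--         prev = value
--     return True
-- ===== Notes on version B (the rewrite author's own statement) =====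
-- stated objective: simpler
-- what changed: Replaced the intermediate flattened list plus index loop by a single pass over the items with a prev accumulator checking value-key and key-prev differences directly.
import Mathlib
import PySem

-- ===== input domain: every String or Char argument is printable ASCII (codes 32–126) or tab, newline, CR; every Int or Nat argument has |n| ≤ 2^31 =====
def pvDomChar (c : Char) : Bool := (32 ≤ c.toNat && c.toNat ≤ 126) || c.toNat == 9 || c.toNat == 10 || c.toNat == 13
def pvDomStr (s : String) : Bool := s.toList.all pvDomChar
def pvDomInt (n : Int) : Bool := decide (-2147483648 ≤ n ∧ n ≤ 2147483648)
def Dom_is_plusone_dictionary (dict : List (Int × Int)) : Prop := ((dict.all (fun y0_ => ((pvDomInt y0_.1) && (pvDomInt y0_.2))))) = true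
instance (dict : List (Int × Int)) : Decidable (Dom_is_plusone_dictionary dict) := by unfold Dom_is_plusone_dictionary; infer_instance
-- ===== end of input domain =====

-- B replaces A's intermediate flattened list + index loop by one pass with a prev accumulator (simpler; same result).


-- ===== PORT A =====
-- second loop of A: for i in range(1, len(list)): if list[i] - list[i-1] != 1: return False
def pvALoop (l : List Int) (i : Nat) : Bool :=
  if i < l.length then
    if l.getD i 0 - l.getD (i-1) 0 ≠ 1 then false
    else pvALoop l (i+1)
  else true
termination_by l.length - i

def is_plusone_dictionary (dict : List (Int × Int)) : Bool :=
  -- list = []; for key, value in dict.items(): list.append(key); list.append(value)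
  let list := dict.foldl (fun acc kv => acc ++ [kv.1, kv.2]) []
  pvALoop list 1

-- ===== PORT B =====
-- 'if prev is not None and key - prev != 1: return False' becomes the match on prev
def pvBLoop (prev : Option Int) : List (Int × Int) → Bool
  | [] => true
  | (k, v) :: rest =>
    match prev with
    | some p =>
      if k - p ≠ 1 then false
      else if v - k ≠ 1 then false
      else pvBLoop (some v) rest
    | none =>
      if v - k ≠ 1 then false
      else pvBLoop (some v) rest

def is_plusone_dictionary_alt (dict : List (Int × Int)) : Bool :=
  pvBLoop none dict

-- ===== PRECONDITION & SPEC =====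
-- Pre_ excludes association lists with duplicate keys: those do not represent any Python
-- dict (dict keys are unique), so the behaviour of A on them is not defined by the source.
def Pre_is_plusone_dictionary (dict : List (Int × Int)) : Prop := (dict.map Prod.fst).Nodup
instance (dict : List (Int × Int)) : Decidable (Pre_is_plusone_dictionary dict) := by unfold Pre_is_plusone_dictionary; infer_instance
def pvWitness_is_plusone_dictionary : (List (Int × Int)) := [(1, 2), (3, 4)]

def Spec_is_plusone_dictionary (dict : List (Int × Int)) (out : Bool) : Prop := out = is_plusone_dictionary_alt dict
instance (dict : List (Int × Int)) (out : Bool) : Decidable (Spec_is_plusone_dictionary dict out) := by unfold Spec_is_plusone_dictionary; infer_instance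

-- ===== CLAIM (what is proved, stated in full; the proofs are below) =====
def Claim_equal_is_plusone_dictionary : Prop := ∀ (dict : List (Int × Int)), Dom_is_plusone_dictionary dict → Pre_is_plusone_dictionary dict → Spec_is_plusone_dictionary dict (is_plusone_dictionary dict)

-- ===== LEMMAS AND PROOFS =====

-- adjacency check on a plain list: every adjacent difference is 1
def pvAdjOk : List Int → Bool
  | a :: b :: t => if b - a = 1 then pvAdjOk (b :: t) else false
  | _ => true

-- direct flattening of the items list
def pvFlat : List (Int × Int) → List Int
  | [] => []
  | (k, v) :: rest => k :: v :: pvFlat rest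

theorem pvFoldl_flat (d : List (Int × Int)) (acc : List Int) :
    d.foldl (fun acc kv => acc ++ [kv.1, kv.2]) acc = acc ++ pvFlat d := by
  induction d generalizing acc with
  | nil => simp [pvFlat]
  | cons kv rest ih => cases kv; simp [List.foldl, pvFlat, ih]

theorem pvAdjOk_short (l : List Int) (h : l.length ≤ 1) : pvAdjOk l = true := by
  match l, h with
  | [], _ => rfl
  | [a], _ => rfl

theorem pvALoop_eq_adjOk (l : List Int) : ∀ n i, l.length - i = n → 1 ≤ i →
    pvALoop l i = pvAdjOk (l.drop (i-1)) := by
  intro n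
  induction n with
  | zero =>
    intro i hn hi
    have hle : l.length ≤ i := by omega
    rw [pvALoop]
    simp only [if_neg (by omega : ¬ i < l.length)]
    have hlen : (l.drop (i-1)).length ≤ 1 := by rw [List.length_drop]; omega
    rw [pvAdjOk_short _ hlen]
  | succ n ih =>
    intro i hn hi
    have hlt : i < l.length := by omega
    have h1 : i - 1 < l.length := by omega
    have hd1 : l.drop (i-1) = l[i-1] :: l.drop i := by
      have h' : i - 1 + 1 = i := by omega
      rw [List.drop_eq_getElem_cons h1, h']
    have hd2 : l.drop i = l[i] :: l.drop (i+1) := List.drop_eq_getElem_cons hlt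
    rw [pvALoop]
    simp only [if_pos hlt]
    rw [List.getD_eq_getElem l 0 hlt, List.getD_eq_getElem l 0 h1]
    rw [hd1, hd2, pvAdjOk]
    by_cases hdiff : l[i] - l[i-1] = 1
    · rw [if_pos hdiff, if_neg (by simp [hdiff]), ih (i+1) (by omega) (by omega),
        Nat.add_sub_cancel, hd2]
    · simp [hdiff]

theorem pvBLoop_none_eq (d : List (Int × Int)) : pvBLoop none d = pvAdjOk (pvFlat d) ∧
    ∀ p : Int, pvBLoop (some p) d = pvAdjOk (p :: pvFlat d) := by
  induction d with
  | nil => exact ⟨rfl, fun p => rfl⟩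
  | cons kv rest ih =>
    obtain ⟨k, v⟩ := kv
    constructor
    · rw [pvBLoop, pvFlat, pvAdjOk]
      by_cases h : v - k = 1
      · rw [if_pos h, if_neg (by simp [h])]
        exact ih.2 v
      · rw [if_neg h, if_pos h]
    · intro p
      rw [pvBLoop, pvFlat, pvAdjOk]
      by_cases hp : k - p = 1
      · rw [if_pos hp, if_neg (by simp [hp]), pvAdjOk]
        by_cases h : v - k = 1
        · rw [if_pos h, if_neg (by simp [h])]
          exact ih.2 v
        · rw [if_neg h, if_pos h]
      · rw [if_neg hp, if_pos hp]

-- ===== VERDICT (by name: the statement is the Claim_ definition above) =====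
theorem is_plusone_dictionary_spec : Claim_equal_is_plusone_dictionary := by
  intro dict _ _
  unfold Spec_is_plusone_dictionary is_plusone_dictionary is_plusone_dictionary_alt
  rw [pvFoldl_flat, List.nil_append,
    pvALoop_eq_adjOk (pvFlat dict) ((pvFlat dict).length - 1) 1 rfl le_rfl,
    (pvBLoop_none_eq dict).1]
  rfl
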